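-- pv_equiv track=rewrite | github.com/Kr1shi/epilepsy-prediction | total_accuracy.py | apply_smoothing
-- ===== SOURCE A (Python) =====
-- def apply_smoothing(all_predictions, t, x):
--     """
--     Apply smoothing to a list of predictions.
--
--     Args:
--         all_predictions: List of predictions.
--         t: Window size for smoothing.
--         x: Minimum number of positive predictions in the window.
--
--     Returns:
--         List of smoothed predictions.
--     """
--     smoothed_predictions = []
--     for i in range(len(all_predictions) - t + 1):
--         window = all_predictions[i : i + t]
--         if sum(window) >= x:
--             smoothed_predictions.append(1)
--         else:
--             smoothed_predictions.append(0)
--     return smoothed_predictions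
-- ===== SOURCE B (Python) =====
-- def apply_smoothing(all_predictions, t, x):
--     """Sliding-window smoothing: maintain a running window sum, O(n)."""
--     n = len(all_predictions)
--     if t > n:
--         return []
--     s = sum(all_predictions[:t])
--     out = [1 if s >= x else 0]
--     for i in range(n - t):
--         s += all_predictions[i + t] - all_predictions[i]
--         out.append(1 if s >= x else 0)
--     return out
-- ===== Notes on version B (the rewrite author's own statement) =====
-- stated objective: faster
-- what changed: Replaces re-summing a fresh t-length slice for every window position with a single running window sum updated by adding/subtracting one element per step.
-- outside the precondition, e.g. on apply_smoothing([1, 2, 3], -1, 2): A returns [1, 0, 0, 0, 0], B raises IndexError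
import Mathlib
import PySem

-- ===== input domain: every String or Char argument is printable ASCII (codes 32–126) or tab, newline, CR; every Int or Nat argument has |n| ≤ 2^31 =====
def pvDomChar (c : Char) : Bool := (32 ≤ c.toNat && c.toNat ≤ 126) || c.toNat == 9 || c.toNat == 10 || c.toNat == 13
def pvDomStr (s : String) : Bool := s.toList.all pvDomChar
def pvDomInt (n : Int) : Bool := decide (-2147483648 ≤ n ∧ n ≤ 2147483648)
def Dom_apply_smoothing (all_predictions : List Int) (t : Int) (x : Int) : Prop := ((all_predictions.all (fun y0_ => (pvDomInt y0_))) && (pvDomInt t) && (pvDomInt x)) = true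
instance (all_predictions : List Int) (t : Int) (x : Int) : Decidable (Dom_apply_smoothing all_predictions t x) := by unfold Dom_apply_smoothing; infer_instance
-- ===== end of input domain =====

-- B replaces A's per-window slice re-summation by a running window sum (one add/subtract per step); measured asymptotically faster.


-- ===== PORT A =====
-- literal port of A: for each i in range(len-t+1), slice the window and test its sum
def apply_smoothing (all_predictions : List Int) (t : Int) (x : Int) : List Int :=
  (PySem.List.pyRange 0 ((all_predictions.length : Int) - t + 1) 1).foldl
    (fun acc i =>
      let window := PySem.List.slice all_predictions (some i) (some (i + t))
      acc ++ [if window.sum ≥ x then (1 : Int) else 0]) []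

-- ===== PORT B =====
-- Source B's loop body: s += a[i+t] - a[i]; out.append(1 if s >= x else 0)
def pvBstep (a : List Int) (t x : Int) (st : Int × List Int) (i : Int) : Int × List Int :=
  let s := st.1 + PySem.List.pyGetD a (i + t) 0 - PySem.List.pyGetD a i 0
  (s, st.2 ++ [if s ≥ x then 1 else 0])

-- literal port of Source B: running window sum; pyGetD is exact here since under Pre_ (0 ≤ t)
-- both indices i and i+t are in range throughout the loop
def apply_smoothing_alt (all_predictions : List Int) (t : Int) (x : Int) : List Int :=
  let n : Int := all_predictions.length
  if t > n then []
  else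
    let s0 := (PySem.List.slice all_predictions none (some t)).sum
    let out0 : List Int := [if s0 ≥ x then 1 else 0]
    ((PySem.List.pyRange 0 (n - t) 1).foldl (pvBstep all_predictions t x) (s0, out0)).2

-- ===== PRECONDITION & SPEC =====
-- Pre_ excludes t < 0, where A's slice clamping returns an accidental value for a
-- nonsensical (negative) window size while B's natural sliding loop raises IndexError.
def Pre_apply_smoothing (all_predictions : List Int) (t : Int) (x : Int) : Prop := 0 ≤ t
instance (all_predictions : List Int) (t : Int) (x : Int) : Decidable (Pre_apply_smoothing all_predictions t x) := by unfold Pre_apply_smoothing; infer_instance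
def pvWitness_apply_smoothing : List Int × Int × Int := ([1, 0, 1], 2, 1)

def Spec_apply_smoothing (all_predictions : List Int) (t : Int) (x : Int) (out : List Int) : Prop := out = apply_smoothing_alt all_predictions t x
instance (all_predictions : List Int) (t : Int) (x : Int) (out : List Int) : Decidable (Spec_apply_smoothing all_predictions t x out) := by unfold Spec_apply_smoothing; infer_instance

-- ===== CLAIM (what is proved, stated in full; the proofs are below) =====
def Claim_equal_apply_smoothing : Prop := ∀ (all_predictions : List Int) (t : Int) (x : Int), Dom_apply_smoothing all_predictions t x → Pre_apply_smoothing all_predictions t x → Spec_apply_smoothing all_predictions t x (apply_smoothing all_predictions t x)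

-- ===== LEMMAS AND PROOFS =====

-- window sum at Nat index i with Nat window size T
def pvWin (a : List Int) (T i : Nat) : Int := ((a.drop i).take T).sum

-- sliding identity: moving the window one step right adds a[i+T] and removes a[i]
lemma pvWin_slide (a : List Int) (T i : Nat) (h : i + T < a.length) :
    pvWin a T (i + 1) = pvWin a T i + a[i + T]?.getD 0 - a[i]?.getD 0 := by
  cases T with
  | zero => simp [pvWin]
  | succ T' =>
    have hi : i < a.length := by omega
    have hiT : i + 1 + T' < a.length := by omega
    have hdrop : a.drop i = a[i] :: a.drop (i + 1) := List.drop_eq_getElem_cons hi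
    have h1 : pvWin a (T' + 1) i = a[i] + ((a.drop (i + 1)).take T').sum := by
      rw [pvWin, hdrop, List.take_succ_cons, List.sum_cons]
    have h2 : pvWin a (T' + 1) (i + 1)
        = ((a.drop (i + 1)).take T').sum + a[i + 1 + T'] := by
      have hget : (a.drop (i + 1))[T']? = some a[i + 1 + T'] := by
        rw [List.getElem?_drop]
        exact List.getElem?_eq_getElem hiT
      simp [pvWin, List.take_add_one, hget]
    have hd1 : a[i + (T' + 1)]?.getD 0 = a[i + 1 + T'] := by
      rw [List.getElem?_eq_getElem (by omega : i + (T' + 1) < a.length)]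
      simp only [Option.getD_some]
      congr 1
      omega
    have hd2 : a[i]?.getD 0 = a[i] := by
      rw [List.getElem?_eq_getElem hi]
      rfl
    rw [h1, h2, hd1, hd2]; ring

-- B's loop body on Nat indices
def pvStep (a : List Int) (x : Int) (T : Nat) (st : Int × List Int) (k : Nat) : Int × List Int :=
  let s := st.1 + a[k + T]?.getD 0 - a[k]?.getD 0
  (s, st.2 ++ [if s ≥ x then 1 else 0])

-- loop invariant for B: after m steps the state is (window sum at m, outputs for windows 0..m)
lemma pvLoop (a : List Int) (x : Int) (T m : Nat) (init : List Int)
    (hm : m + T ≤ a.length) :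
    (List.range m).foldl (pvStep a x T) (pvWin a T 0, init)
      = (pvWin a T m,
         init ++ (List.range m).map (fun k => if pvWin a T (k + 1) ≥ x then (1 : Int) else 0)) := by
  induction m with
  | zero => simp
  | succ m ih =>
    rw [List.range_succ, List.foldl_append, ih (by omega)]
    have hs : pvWin a T m + a[m + T]?.getD 0 - a[m]?.getD 0 = pvWin a T (m + 1) :=
      (pvWin_slide a T m (by omega)).symm
    simp [pvStep, hs, List.map_append]

-- A as a map over Nat indices
lemma pvA_eq (a : List Int) (t x : Int) (ht : 0 ≤ t) :
    apply_smoothing a t x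
      = (List.range ((a.length : Int) - t + 1).toNat).map
          (fun k => if pvWin a t.toNat k ≥ x then (1 : Int) else 0) := by
  unfold apply_smoothing
  rw [PySem.List.pyRange_one, PySem.List.foldl_append_singleton_eq_map, List.map_map]
  simp only [List.nil_append, sub_zero]
  refine List.map_congr_left (fun k _ => ?_)
  have hsl : PySem.List.slice a (some ((k : Nat) : Int)) (some ((k : Int) + t))
      = (a.drop k).take t.toNat := by
    rw [show ((k : Int) + t) = ((k : Nat) : Int) + ((t.toNat : Nat) : Int) by omega]
    exact PySem.List.slice_natCast_add a k t.toNat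
  simp [Function.comp, hsl, pvWin]

-- B in closed form over Nat indices
lemma pvB_eq (a : List Int) (t x : Int) (ht : 0 ≤ t) (htn : ¬ t > (a.length : Int)) :
    apply_smoothing_alt a t x
      = (if pvWin a t.toNat 0 ≥ x then (1 : Int) else 0)
          :: (List.range (a.length - t.toNat)).map
              (fun k => if pvWin a t.toNat (k + 1) ≥ x then (1 : Int) else 0) := by
  show (if t > (a.length : Int) then [] else
      ((PySem.List.pyRange 0 ((a.length : Int) - t) 1).foldl (pvBstep a t x)
        ((PySem.List.slice a none (some t)).sum,
         [if (PySem.List.slice a none (some t)).sum ≥ x then (1 : Int) else 0])).2) = _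
  rw [if_neg htn]
  have hs0 : (PySem.List.slice a none (some t)).sum = pvWin a t.toNat 0 := by
    rw [PySem.List.slice_to a ht]; simp [pvWin]
  have hlen : ((a.length : Int) - t - 0).toNat = a.length - t.toNat := by omega
  have hfun : (fun (st : Int × List Int) (k : Nat) => pvBstep a t x st (0 + (k : Int)))
      = pvStep a x t.toNat := by
    funext st k
    have hkT : ((k : Int) + t) = (((k + t.toNat : Nat)) : Int) := by
      push_cast
      omega
    have hk0 : ((0 : Int) + (k : Int)) = ((k : Nat) : Int) := by omega
    simp only [pvBstep, pvStep, hk0, hkT, PySem.List.pyGetD_natCast, List.getD_eq_getElem?_getD]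
  rw [hs0, PySem.List.pyRange_one, List.foldl_map, hlen, hfun,
      pvLoop a x t.toNat (a.length - t.toNat) _ (by omega)]
  simp

-- ===== VERDICT (by name: the statement is the Claim_ definition above) =====
theorem apply_smoothing_spec : Claim_equal_apply_smoothing := by
  intro a t x _ ht
  unfold Pre_apply_smoothing at ht
  unfold Spec_apply_smoothing
  by_cases htn : t > (a.length : Int)
  · have hA : apply_smoothing a t x = [] := by
      rw [pvA_eq a t x ht]
      have h0 : ((a.length : Int) - t + 1).toNat = 0 := by omega
      simp [h0]
    have hB : apply_smoothing_alt a t x = [] := by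
      unfold apply_smoothing_alt
      simp only []
      rw [if_pos htn]
    rw [hA, hB]
  · rw [pvA_eq a t x ht, pvB_eq a t x ht htn]
    have h1 : ((a.length : Int) - t + 1).toNat = (a.length - t.toNat) + 1 := by omega
    rw [h1, List.range_succ_eq_map, List.map_cons, List.map_map]
    simp [Function.comp]
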